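-- pv_equiv track=rewrite | github.com/ValerioSpagnoli/University | Fondamenti di Informatica 1/Esercitazioni/Esercitazione 9/Eserc2/Ex2.py | Ex2
-- ===== SOURCE A (Python) =====
-- def Ex2(s,n):
--     d = {}
--     sp = s.split()
--     for parola in sp:
--         if len(parola)>=n:
--             chiave = parola[0]
--             if chiave in d:
--                 d[chiave] = d[chiave] + 1
--             else:
--                 d[chiave] = 1
--     return d
-- ===== SOURCE B (Python) =====
-- def Ex2(s, n):
--     words = [w for w in s.split() if len(w) >= n]
--     keys = list(dict.fromkeys(w[0] for w in words))
--     return {c: sum(1 for w in words if w[0] == c) for c in keys}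
-- ===== Notes on version B (the rewrite author's own statement) =====
-- stated objective: alternative
-- what changed: B first materialises the filtered word list, collects the distinct first letters in order of first appearance (dict.fromkeys), and builds the result by a separate counting pass per key, instead of A's single inline dict tally.
import Mathlib
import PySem

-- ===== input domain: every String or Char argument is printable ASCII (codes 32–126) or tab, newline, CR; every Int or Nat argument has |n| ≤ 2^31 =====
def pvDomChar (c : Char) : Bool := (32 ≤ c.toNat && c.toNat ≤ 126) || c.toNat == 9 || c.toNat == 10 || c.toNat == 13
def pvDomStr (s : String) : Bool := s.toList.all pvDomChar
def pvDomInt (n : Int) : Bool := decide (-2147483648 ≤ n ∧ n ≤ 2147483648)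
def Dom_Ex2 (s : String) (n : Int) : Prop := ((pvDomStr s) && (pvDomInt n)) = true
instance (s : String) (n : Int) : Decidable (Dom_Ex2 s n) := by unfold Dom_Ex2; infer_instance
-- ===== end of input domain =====

-- B groups by distinct first letters collected up front instead of A's inline tally; same cost class (alternative decomposition).

-- ===== PORT A =====
-- transliteration of A's single loop: a dict tally over s.split()
def Ex2 (s : String) (n : Int) : List (String × Int) :=
  let sp := PySem.Str.split₀ s
  (sp.foldl (fun d parola =>
    if PySem.Str.len parola ≥ n then
      let chiave := ((PySem.Str.pyGet? parola 0).map String.singleton).getD ""  -- parola[0]; split words are nonempty, so the IndexError default is unreachable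
      if d.contains chiave then
        d.insert chiave (d.getD chiave 0 + 1)  -- d[chiave] known present, so getD's default is unreachable
      else
        d.insert chiave 1
    else d) PySem.Dict.empty).items

-- ===== PORT B =====
-- transliteration of Source B: filter, then ordered distinct keys (dict.fromkeys = PySem.List.dedup), then a count per key
def Ex2_alt (s : String) (n : Int) : List (String × Int) :=
  let words := (PySem.Str.split₀ s).filter (fun w => PySem.Str.len w ≥ n)
  let keys := PySem.List.dedup (words.map (fun w => ((PySem.Str.pyGet? w 0).map String.singleton).getD ""))
  keys.map (fun c => (c, (words.countP (fun w => ((PySem.Str.pyGet? w 0).map String.singleton).getD "" == c) : Int)))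

-- ===== PRECONDITION & SPEC =====
def Spec_Ex2 (s : String) (n : Int) (out : List (String × Int)) : Prop := out = Ex2_alt s n
instance (s : String) (n : Int) (out : List (String × Int)) : Decidable (Spec_Ex2 s n out) := by unfold Spec_Ex2; infer_instance

-- ===== CLAIM (what is proved, stated in full; the proofs are below) =====
def Claim_equal_Ex2 : Prop := ∀ (s : String) (n : Int), Dom_Ex2 s n → Spec_Ex2 s n (Ex2 s n)

-- ===== LEMMAS AND PROOFS =====

-- A's two-branch update is exactly the counter bump
theorem bump_eq (d : PySem.Dict String Int) (k : String) :
    (if d.contains k then d.insert k (d.getD k 0 + 1) else d.insert k 1)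
      = d.insert k (d.getD k 0 + 1) := by
  by_cases h : d.contains k = true
  · simp [h]
  · have hn : d.get? k = none := by
      have hc := PySem.Dict.contains_eq_isSome_get? d k
      cases hg : d.get? k with
      | none => rfl
      | some v => rw [hg] at hc; simp [hc] at h
    have hg0 : d.getD k 0 = 0 := by
      show (d.get? k).getD 0 = 0
      rw [hn]; rfl
    simp [h, hg0]

-- ===== VERDICT (by name: the statement is the Claim_ definition above) =====
theorem Ex2_spec : Claim_equal_Ex2 := by
  intro s n _
  unfold Spec_Ex2 Ex2 Ex2_alt
  simp only []
  rw [PySem.List.foldl_ite_eq_foldl_filter (p := fun w => PySem.Str.len w ≥ n)]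
  simp only [bump_eq]
  have key : ∀ (ws : List String),
      ws.foldl (fun d w => d.insert ((Option.map String.singleton (PySem.Str.pyGet? w 0)).getD "")
        (d.getD ((Option.map String.singleton (PySem.Str.pyGet? w 0)).getD "") 0 + 1)) PySem.Dict.empty
      = PySem.Dict.counter (ws.map (fun w => ((PySem.Str.pyGet? w 0).map String.singleton).getD "")) := by
    intro ws
    rw [← PySem.Dict.foldl_insert_getD_add_one_eq_counter, List.foldl_map]
  rw [key, PySem.Dict.items_counter, PySem.List.dedup_eq_ofList]
  congr 1
  funext c
  rw [List.count_eq_countP, List.countP_map]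
  rfl
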